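-- pv_equiv track=rewrite | github.com/Duy-Nguyen-uni-ffm/find_select_and_cluster_BGCs | stats_utils.py | group_products
-- ===== SOURCE A (Python) =====
-- def group_products(product_stats):
--     """
--     Group products that belong to the same class.
--
--     Parameters
--     ----------
--     product_stats : dict of {str : int}
--         Statistics of product(s) of selected BGCs.
--
--     Returns
--     -------
--     product_stats_grouped : dict of {str : int}
--         Statistics of product(s) of selected BGCs where products belonging to same class are grouped and represented by the class (occurrence frequency of each class is sum of that of its member product(s)).
--     """
--     list_of_predefined_groups_of_products = ["hybrid", "others", "RiPP", "NRPS-like", "T1PKS", "NRPS", "arylpolyene", "T3PKS", "terpene"] # Note: this list can be updated by user. Also, the order of the product groups in this list is also the order of the product groups for printing out on Terminal, plotting and writing in file. Important: the groups "others", "hybrid" should always be in this list.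
--     product_stats_grouped                 = dict.fromkeys(list_of_predefined_groups_of_products, 0)
--     for product in product_stats:
--         if   product in list_of_predefined_groups_of_products:                                                  # Predefined groups of products that should only be plotted
--             product_stats_grouped[product]   += product_stats[product]
--         elif "+" in product:                                                                                    # Hybrid BGCs contain "+" in their names
--             product_stats_grouped["hybrid"]  += product_stats[product]
--         elif product in ["RRE-containing", "LAP", "lanthipeptide-class-i", "lanthipeptide-class-ii", "lanthipeptide-class-iii", "lanthipeptide-class-iv", "thiopeptide"]:                     # Products from class RiPP
--             product_stats_grouped["RiPP"]    += product_stats[product]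
--         else:                                                                                                   # Products that do not belong to any predefined groups
--             product_stats_grouped["others"]  += product_stats[product]
--     return  product_stats_grouped
-- ===== SOURCE B (Python) =====
-- def group_products(product_stats):
--     predefined = ["hybrid", "others", "RiPP", "NRPS-like", "T1PKS", "NRPS", "arylpolyene", "T3PKS", "terpene"]
--     ripp_members = ["RRE-containing", "LAP", "lanthipeptide-class-i", "lanthipeptide-class-ii", "lanthipeptide-class-iii", "lanthipeptide-class-iv", "thiopeptide"]
--
--     def classify(product):
--         if product in predefined:
--             return product
--         if "+" in product:
--             return "hybrid"
--         if product in ripp_members: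
--             return "RiPP"
--         return "others"
--
--     return {group: sum(count for product, count in product_stats.items() if classify(product) == group)
--             for group in predefined}
-- ===== Notes on version B (the rewrite author's own statement) =====
-- stated objective: simpler
-- what changed: A's single mutating-accumulator loop with four insert branches is replaced by a pure classify helper plus a per-group sum comprehension that builds the result dict directly, one group at a time, with no mutable grouped dict at all.
import Mathlib
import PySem

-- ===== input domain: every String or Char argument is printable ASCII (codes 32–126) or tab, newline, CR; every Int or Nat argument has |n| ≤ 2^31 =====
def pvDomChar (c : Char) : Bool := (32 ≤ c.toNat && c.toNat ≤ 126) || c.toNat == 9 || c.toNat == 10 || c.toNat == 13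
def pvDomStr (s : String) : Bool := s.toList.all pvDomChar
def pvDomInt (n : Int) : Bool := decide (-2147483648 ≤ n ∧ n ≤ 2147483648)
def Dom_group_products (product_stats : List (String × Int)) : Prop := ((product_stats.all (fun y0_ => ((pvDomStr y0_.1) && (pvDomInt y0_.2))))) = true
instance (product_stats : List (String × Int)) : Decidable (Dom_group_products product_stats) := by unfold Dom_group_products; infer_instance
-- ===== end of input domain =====

-- B builds the result as a per-group sum over a pure classify helper instead of A's single loop mutating a grouped dict (simpler; same results).


-- ===== PORT A =====
-- the predefined group names and the RiPP member names (shared literals of both Pythons)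
def gp_predefined : List String :=
  ["hybrid", "others", "RiPP", "NRPS-like", "T1PKS", "NRPS", "arylpolyene", "T3PKS", "terpene"]
def gp_ripp : List String :=
  ["RRE-containing", "LAP", "lanthipeptide-class-i", "lanthipeptide-class-ii",
   "lanthipeptide-class-iii", "lanthipeptide-class-iv", "thiopeptide"]

-- iterating a Python dict given as an assoc list = first occurrence of each key, value = first binding
def group_products (product_stats : List (String × Int)) : List (String × Int) :=
  let stats := PySem.Dict.mk product_stats
  let grouped0 := gp_predefined.foldl (fun d k => d.insert k (0 : Int)) PySem.Dict.empty
  let res := (PySem.List.dedup (product_stats.map Prod.fst)).foldl (fun g p =>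
    if gp_predefined.contains p then
      g.insert p (g.getD p 0 + stats.getD p 0)
    else if PySem.Str.isIn "+" p then
      g.insert "hybrid" (g.getD "hybrid" 0 + stats.getD p 0)
    else if gp_ripp.contains p then
      g.insert "RiPP" (g.getD "RiPP" 0 + stats.getD p 0)
    else
      g.insert "others" (g.getD "others" 0 + stats.getD p 0)) grouped0
  res.items

-- ===== PORT B =====
-- def classify(product): the predefined-name / '+' / RiPP-member / others decision, as a pure function
def gp_classify (p : String) : String :=
  if gp_predefined.contains p then p
  else if PySem.Str.isIn "+" p then "hybrid"
  else if gp_ripp.contains p then "RiPP"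
  else "others"

-- {group: sum(count for product, count in product_stats.items() if classify(product) == group) for group in predefined}
-- (.items() of the Python dict = first occurrence of each key with its first binding)
def group_products_alt (product_stats : List (String × Int)) : List (String × Int) :=
  let stats := PySem.Dict.mk product_stats
  let items := (PySem.List.dedup (product_stats.map Prod.fst)).map (fun k => (k, stats.getD k 0))
  gp_predefined.map (fun g =>
    (g, items.foldl (fun a pc => if gp_classify pc.1 == g then a + pc.2 else a) 0))

-- ===== PRECONDITION & SPEC =====
def Spec_group_products (product_stats : List (String × Int)) (out : List (String × Int)) : Prop := out = group_products_alt product_stats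
instance (product_stats : List (String × Int)) (out : List (String × Int)) : Decidable (Spec_group_products product_stats out) := by unfold Spec_group_products; infer_instance

-- ===== CLAIM (what is proved, stated in full; the proofs are below) =====
def Claim_equal_group_products : Prop := ∀ (product_stats : List (String × Int)), Dom_group_products product_stats → Spec_group_products product_stats (group_products product_stats)

-- ===== LEMMAS AND PROOFS =====

-- A's four-branch loop body inserts exactly at the key B's classify computes
lemma gp_step (stats g : PySem.Dict String Int) (p : String) :
    (if gp_predefined.contains p then
      g.insert p (g.getD p 0 + stats.getD p 0)
    else if PySem.Str.isIn "+" p then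
      g.insert "hybrid" (g.getD "hybrid" 0 + stats.getD p 0)
    else if gp_ripp.contains p then
      g.insert "RiPP" (g.getD "RiPP" 0 + stats.getD p 0)
    else
      g.insert "others" (g.getD "others" 0 + stats.getD p 0))
    = g.insert (gp_classify p) (g.getD (gp_classify p) 0 + stats.getD p 0) := by
  unfold gp_classify
  split_ifs <;> rfl

lemma gp_classify_mem (p : String) : gp_classify p ∈ gp_predefined := by
  unfold gp_classify
  split_ifs with h1 h2 h3
  · simpa using h1
  · decide
  · decide
  · decide

-- inserting (add c) at a key t ∈ gp_predefined updates exactly that entry of the table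
lemma gp_insert_items (dd : PySem.Dict String Int) (v : String → Int)
    (h : dd.items = gp_predefined.map (fun g => (g, v g)))
    (t : String) (ht : t ∈ gp_predefined) (c : Int) :
    (dd.insert t (dd.getD t 0 + c)).items
      = gp_predefined.map (fun g => (g, if t == g then v g + c else v g)) := by
  have hkeys : dd.keys = gp_predefined := by
    simp only [PySem.Dict.keys, h, List.map_map]
    simp [Function.comp_def]
  have hnd : dd.keys.Nodup := by rw [hkeys]; decide
  have hmem : (t, v t) ∈ dd.items := by
    rw [h]; exact List.mem_map_of_mem ht
  have hget : dd.getD t 0 = v t := PySem.Dict.getD_of_mem_items dd hmem hnd 0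
  have hcont : dd.contains t = true := by
    rw [PySem.Dict.contains_iff_mem_keys, hkeys]; exact ht
  rw [hget, PySem.Dict.items_insert_of_contains dd (v t + c) hcont, h, List.map_map]
  apply List.map_congr_left
  intro g hg
  by_cases hgt : g = t
  · subst hgt; simp
  · simp [hgt, Ne.symm hgt]

-- loop invariant: A's fold keeps the 9-entry table, each entry summing the counts its group classifies to
lemma gp_inv (stats : PySem.Dict String Int) (ps : List String) :
    ∀ (dd : PySem.Dict String Int) (v : String → Int),
      dd.items = gp_predefined.map (fun g => (g, v g)) →
      (ps.foldl (fun g p =>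
        if gp_predefined.contains p then
          g.insert p (g.getD p 0 + stats.getD p 0)
        else if PySem.Str.isIn "+" p then
          g.insert "hybrid" (g.getD "hybrid" 0 + stats.getD p 0)
        else if gp_ripp.contains p then
          g.insert "RiPP" (g.getD "RiPP" 0 + stats.getD p 0)
        else
          g.insert "others" (g.getD "others" 0 + stats.getD p 0)) dd).items
      = gp_predefined.map (fun g =>
          (g, ps.foldl (fun a p => if gp_classify p == g then a + stats.getD p 0 else a) (v g))) := by
  induction ps with
  | nil => intro dd v h; simpa using h
  | cons p ps ih =>
    intro dd v h
    rw [List.foldl_cons, gp_step stats dd p]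
    rw [ih _ (fun g => if gp_classify p == g then v g + stats.getD p 0 else v g)
      (gp_insert_items dd v h (gp_classify p) (gp_classify_mem p) (stats.getD p 0))]
    simp only [List.foldl_cons]

-- ===== VERDICT (by name: the statement is the Claim_ definition above) =====
theorem group_products_spec : Claim_equal_group_products := by
  intro product_stats _
  unfold Spec_group_products group_products group_products_alt
  dsimp only
  rw [gp_inv (PySem.Dict.mk product_stats) (PySem.List.dedup (product_stats.map Prod.fst))
    _ (fun _ => 0) (by decide)]
  simp [List.foldl_map]
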